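-- pv_equiv track=rewrite | github.com/comst007/myLeetCode | leetcode-30.py | ifMatch
-- ===== SOURCE A (Python) =====
-- def ifMatch(s:str, words:list):
--     i = 0
--     wd_len = len(words[0])
--     s_len = len(s)
--     while i <= s_len - wd_len:
--         sub_s = s[i:i + wd_len]
--         if sub_s in words:
--             words.remove(sub_s)
--             i += wd_len
--         else:
--             return False
--
--     if not len(words):
--         return True
--     else:
--         return False
-- ===== SOURCE B (Python) =====
-- def ifMatch(s, words):
--     wd_len = len(words[0])
--     if wd_len == 0:
--         # zero-length words can never be stripped off to empty the word list; A returns False here too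
--         return False
--     chunks = [s[i:i + wd_len] for i in range(0, len(s) - wd_len + 1, wd_len)]
--     return sorted(chunks) == sorted(words)
-- ===== Notes on version B (the rewrite author's own statement) =====
-- stated objective: simpler
-- what changed: Replaces A's greedy scan with repeated membership tests and in-place removal from words by building the chunk list once and comparing sorted(chunks) == sorted(words) (with a wd_len==0 guard returning False, matching A); B does not mutate words (A removes matched words in place) - the equivalence is about the return value.
import Mathlib
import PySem

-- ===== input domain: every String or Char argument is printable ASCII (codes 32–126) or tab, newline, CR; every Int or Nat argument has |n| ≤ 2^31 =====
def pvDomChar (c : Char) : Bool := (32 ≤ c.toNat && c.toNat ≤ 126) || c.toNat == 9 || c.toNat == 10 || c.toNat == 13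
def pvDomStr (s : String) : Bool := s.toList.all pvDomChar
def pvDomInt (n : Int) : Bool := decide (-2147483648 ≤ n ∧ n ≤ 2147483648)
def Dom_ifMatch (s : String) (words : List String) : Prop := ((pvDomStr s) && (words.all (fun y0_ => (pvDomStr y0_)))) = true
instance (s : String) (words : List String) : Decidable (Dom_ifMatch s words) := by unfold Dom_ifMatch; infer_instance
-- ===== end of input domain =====

-- B replaces A's greedy membership-and-remove scan by a sort-then-compare of the chunk list (simpler);
-- A mutates `words` in place (remove), B does not: the equivalence proved is about the RETURN value only.

-- ===== PORT A =====
-- the while loop; each continuing iteration removes one element of `words`, so `words.length` decreases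
def ifMatchGo (s : String) (wdLen : Int) (i : Int) (words : List String) : Bool :=
  if i ≤ PySem.Str.len s - wdLen then
    -- sub_s = s[i:i + wd_len]
    if PySem.Str.slice s (some i) (some (i + wdLen)) ∈ words then    -- sub_s in words
      -- words.remove(sub_s): erases the first occurrence (never raises here, sub_s ∈ words)
      ifMatchGo s wdLen (i + wdLen) (words.erase (PySem.Str.slice s (some i) (some (i + wdLen))))
    else false
  else words.isEmpty                                                 -- not len(words)
termination_by words.length
decreasing_by
  have hm : PySem.Str.slice s (some i) (some (i + wdLen)) ∈ words := by assumption
  have h1 := List.length_erase_of_mem hm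
  have h2 : 0 < words.length := List.length_pos_of_mem hm
  omega

def ifMatch (s : String) (words : List String) : Bool :=
  ifMatchGo s (PySem.Str.len (words.headD "")) 0 words   -- wd_len = len(words[0]); [] excluded by Pre_

-- ===== PORT B =====
def ifMatch_alt (s : String) (words : List String) : Bool :=
  -- wd_len = len(words[0]); if wd_len == 0: return False
  -- chunks = [s[i:i+wd_len] for i in range(0, len(s)-wd_len+1, wd_len)]
  -- return sorted(chunks) == sorted(words)
  if PySem.Str.len (words.headD "") = 0 then false
  else
    decide (PySem.List.sorted
              ((PySem.List.pyRange 0 (PySem.Str.len s - PySem.Str.len (words.headD "") + 1)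
                  (PySem.Str.len (words.headD ""))).map
                (fun i => PySem.Str.slice s (some i) (some (i + PySem.Str.len (words.headD "")))))
              (fun x => x) false
            = PySem.List.sorted words (fun x => x) false)

-- ===== PRECONDITION & SPEC =====
-- Pre_ excludes only words = [], on which A raises IndexError at words[0].
def Pre_ifMatch (s : String) (words : List String) : Prop := words ≠ []
instance (s : String) (words : List String) : Decidable (Pre_ifMatch s words) := by unfold Pre_ifMatch; infer_instance
def pvWitness_ifMatch : String × List String := ("barfoo", ["foo", "bar"])

def Spec_ifMatch (s : String) (words : List String) (out : Bool) : Prop := out = ifMatch_alt s words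
instance (s : String) (words : List String) (out : Bool) : Decidable (Spec_ifMatch s words out) := by unfold Spec_ifMatch; infer_instance

-- ===== CLAIM (what is proved, stated in full; the proofs are below) =====
def Claim_equal_ifMatch : Prop := ∀ (s : String) (words : List String), Dom_ifMatch s words → Pre_ifMatch s words → Spec_ifMatch s words (ifMatch s words)

-- ===== LEMMAS AND PROOFS =====

-- range with a positive step is empty when the bounds are crossed
theorem pyRange_pos_nil (a b s : Int) (hs : 0 < s) (h : b ≤ a) :
    PySem.List.pyRange a b s = [] := by
  rw [PySem.List.pyRange_of_pos a b hs]
  simp [show ¬ a < b by omega]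

-- cons form of range with a positive step
theorem pyRange_pos_cons (a b s : Int) (hs : 0 < s) (h : a < b) :
    PySem.List.pyRange a b s = a :: PySem.List.pyRange (a + s) b s := by
  rw [PySem.List.pyRange_of_pos a b hs, PySem.List.pyRange_of_pos (a + s) b hs]
  have hs0 : s ≠ 0 := by omega
  have hkey : b - a + s - 1 = (b - a - 1) + 1 * s := by ring
  have hdiv : (b - a + s - 1) / s = (b - a - 1) / s + 1 := by
    rw [hkey, Int.add_mul_ediv_right _ _ hs0]
  by_cases hab : a + s < b
  · have h2 : b - (a + s) + s - 1 = b - a - 1 := by ring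
    simp only [h, if_pos, hab, h2, hdiv]
    have hnn : 0 ≤ (b - a - 1) / s := Int.ediv_nonneg (by omega) (by omega)
    rw [show ((b - a - 1) / s + 1).toNat = ((b - a - 1) / s).toNat + 1 by omega]
    rw [List.range_succ_eq_map]
    simp only [List.map_cons, List.map_map]
    congr 1
    · norm_num
    · apply List.map_congr_left
      intro k _
      simp only [Function.comp]
      push_cast
      ring
  · have hz : (b - a - 1) / s = 0 := Int.ediv_eq_zero_of_lt (by omega) (by omega)
    simp only [h, if_pos, if_neg hab, hdiv, hz]
    norm_num

-- the chunk list B builds, starting at index i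
def chunksFrom (s : String) (wdLen i : Int) : List String :=
  (PySem.List.pyRange i (PySem.Str.len s - wdLen + 1) wdLen).map
    (fun j => PySem.Str.slice s (some j) (some (j + wdLen)))

theorem chunksFrom_cons (s : String) (wdLen i : Int) (hw : 0 < wdLen)
    (hi : i ≤ PySem.Str.len s - wdLen) :
    chunksFrom s wdLen i
      = PySem.Str.slice s (some i) (some (i + wdLen)) :: chunksFrom s wdLen (i + wdLen) := by
  unfold chunksFrom
  rw [pyRange_pos_cons i _ wdLen hw (by omega)]
  simp

theorem chunksFrom_nil (s : String) (wdLen i : Int) (hw : 0 < wdLen)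
    (hi : ¬ i ≤ PySem.Str.len s - wdLen) :
    chunksFrom s wdLen i = [] := by
  unfold chunksFrom
  rw [pyRange_pos_nil i _ wdLen hw (by omega)]
  simp

-- A's loop decides whether the remaining chunk list is a permutation of the remaining words
theorem go_eq_perm (s : String) (wdLen : Int) (hw : 0 < wdLen) :
    ∀ (n : Nat) (words : List String), words.length = n → ∀ (i : Int),
      ifMatchGo s wdLen i words = decide ((chunksFrom s wdLen i).Perm words) := by
  intro n
  induction n with
  | zero =>
    intro words hlen i
    have hwnil : words = [] := List.length_eq_zero_iff.mp hlen
    subst hwnil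
    rw [ifMatchGo.eq_def]
    by_cases hi : i ≤ PySem.Str.len s - wdLen
    · simp only [hi, if_true]
      rw [chunksFrom_cons s wdLen i hw hi]
      simp
    · simp only [hi, if_false]
      rw [chunksFrom_nil s wdLen i hw hi]
      simp
  | succ m ih =>
    intro words hlen i
    rw [ifMatchGo.eq_def]
    by_cases hi : i ≤ PySem.Str.len s - wdLen
    · simp only [hi, if_true]
      rw [chunksFrom_cons s wdLen i hw hi]
      by_cases hmem : PySem.Str.slice s (some i) (some (i + wdLen)) ∈ words
      · simp only [hmem, if_true]
        have hlen' : (words.erase (PySem.Str.slice s (some i) (some (i + wdLen)))).length = m := by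
          have := List.length_erase_of_mem hmem; omega
        rw [ih _ hlen' (i + wdLen)]
        rw [decide_eq_decide, List.cons_perm_iff_perm_erase]
        exact ⟨fun hp => ⟨hmem, hp⟩, fun hp => hp.2⟩
      · simp only [hmem, if_false]
        symm
        rw [decide_eq_false_iff_not]
        intro hp
        exact hmem (hp.mem_iff.mp (by simp))
    · simp only [hi, if_false]
      rw [chunksFrom_nil s wdLen i hw hi]
      have hne' : words ≠ [] := by intro h; subst h; simp at hlen
      simp [List.nil_perm, hne']

-- with a zero-length first word, A's loop always ends by returning False:
-- membership of the empty chunk either fails (→ False) or removes an element until it fails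
theorem go_zero_false (s : String) :
    ∀ (n : Nat) (words : List String), words.length = n → ∀ (i : Int),
      0 ≤ i → i ≤ PySem.Str.len s → ifMatchGo s 0 i words = false := by
  intro n
  induction n with
  | zero =>
    intro words hlen i h0 hs
    have hwnil : words = [] := List.length_eq_zero_iff.mp hlen
    subst hwnil
    rw [ifMatchGo.eq_def, if_pos (show i ≤ PySem.Str.len s - 0 by omega)]
    simp
  | succ m ih =>
    intro words hlen i h0 hs
    rw [ifMatchGo.eq_def, if_pos (show i ≤ PySem.Str.len s - 0 by omega)]
    by_cases hmem : PySem.Str.slice s (some i) (some (i + 0)) ∈ words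
    · rw [if_pos hmem]
      have hlen' : (words.erase (PySem.Str.slice s (some i) (some (i + 0)))).length = m := by
        have := List.length_erase_of_mem hmem; omega
      exact ih _ hlen' (i + 0) (by omega) (by omega)
    · rw [if_neg hmem]

-- ===== VERDICT (by name: the statement is the Claim_ definition above) =====
theorem ifMatch_spec : Claim_equal_ifMatch := by
  intro s words _ hpre
  unfold Spec_ifMatch ifMatch ifMatch_alt
  by_cases hz : PySem.Str.len (words.headD "") = 0
  · simp only [hz, if_true]
    have hs0 : 0 ≤ PySem.Str.len s := by
      rw [PySem.Str.len_eq]; positivity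
    exact go_zero_false s words.length words rfl 0 le_rfl hs0
  · simp only [hz, if_false]
    have hw : 0 < PySem.Str.len (words.headD "") := by
      rw [PySem.Str.len_eq] at hz ⊢
      omega
    rw [go_eq_perm s _ hw words.length words rfl 0]
    rw [decide_eq_decide, PySem.List.sorted_id_eq_sorted_id_iff_perm]
    unfold chunksFrom
    exact Iff.rfl
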